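-- pv_equiv track=rewrite | github.com/shattang/molecular-translation-project | data_utils.py | tokenize_back_groups
-- ===== SOURCE A (Python) =====
-- def tokenize_back_groups(s):
--     ret = []
--     if s is None:
--         return ret
--     curr_token = ''
--     for i in range(len(s)):
--         c = s[i]
--         if c == '/':
--             if len(curr_token) > 0:
--                 ret.append(curr_token)
--                 curr_token = ''
--             curr_token += c
--             continue
--
--         if curr_token == '/':
--             curr_token += c
--             ret.append(curr_token)
--             curr_token = ''
--             continue
--
--         if c.isdigit():
--             curr_token += c
--         else:
--             if len(curr_token) > 0:
--                 ret.append(curr_token)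
--                 curr_token = ''
--                 ret.append(c)
--             else:
--                 ret.append(c)
--
--     if len(curr_token) > 0:
--         ret.append(curr_token)
--     return ret
-- ===== SOURCE B (Python) =====
-- def tokenize_back_groups(s):
--     if s is None:
--         return []
--     ret = []
--     i = 0
--     n = len(s)
--     while i < n:
--         c = s[i]
--         if c == '/':
--             if i + 1 < n and s[i + 1] != '/':
--                 ret.append(s[i:i + 2])
--                 i += 2
--             else:
--                 ret.append('/')
--                 i += 1
--         elif c.isdigit():
--             j = i + 1
--             while j < n and s[j].isdigit():
--                 j += 1
--             ret.append(s[i:j])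
--             i = j
--         else:
--             ret.append(c)
--             i += 1
--     return ret
-- ===== Notes on version B (the rewrite author's own statement) =====
-- stated objective: alternative
-- what changed: Replaced the threaded curr_token accumulator state machine with an index-based lookahead tokenizer: slash tokens are resolved by a one-character lookahead and digit runs are consumed by an inner scan emitting a slice, so no partial-token state is carried between iterations.
import Mathlib
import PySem

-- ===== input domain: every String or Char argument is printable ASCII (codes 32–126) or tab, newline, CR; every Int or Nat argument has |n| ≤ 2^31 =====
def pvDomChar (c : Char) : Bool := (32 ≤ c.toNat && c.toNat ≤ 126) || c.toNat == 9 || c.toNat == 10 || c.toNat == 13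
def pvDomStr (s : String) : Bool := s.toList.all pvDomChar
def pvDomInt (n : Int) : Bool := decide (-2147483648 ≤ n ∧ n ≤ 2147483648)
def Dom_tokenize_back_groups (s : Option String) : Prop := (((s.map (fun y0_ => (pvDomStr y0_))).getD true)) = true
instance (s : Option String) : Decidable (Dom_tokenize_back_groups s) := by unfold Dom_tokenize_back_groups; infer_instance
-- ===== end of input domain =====

-- B replaces A's threaded curr_token state machine by an index/lookahead tokenizer (alternative decomposition, same cost).

-- ===== PORT A =====
-- one iteration of A's for-loop: state = (ret, curr_token as List Char)
def aStep (st : List String × List Char) (c : Char) : List String × List Char :=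
  if c = '/' then
    if st.2.length > 0 then (st.1 ++ [String.ofList st.2], ['/']) else (st.1, ['/'])
  else if st.2 = ['/'] then
    (st.1 ++ [String.ofList (st.2 ++ [c])], [])
  else if PySem.Chars.isdigit c then
    (st.1, st.2 ++ [c])
  else if st.2.length > 0 then
    (st.1 ++ [String.ofList st.2, String.ofList [c]], [])
  else
    (st.1 ++ [String.ofList [c]], [])

-- the trailing 'if len(curr_token) > 0: ret.append(curr_token)'
def aFinish (st : List String × List Char) : List String :=
  if st.2.length > 0 then st.1 ++ [String.ofList st.2] else st.1

def tokenize_back_groups (s : Option String) : List String :=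
  match s with
  | none => []
  | some s => aFinish (s.toList.foldl aStep ([], []))

-- ===== PORT B =====
-- inner while-loop of B: split off the leading digit run
def digitRun (cs : List Char) : List Char × List Char :=
  match cs with
  | [] => ([], [])
  | c :: rest =>
    if PySem.Chars.isdigit c then
      let p := digitRun rest
      (c :: p.1, p.2)
    else ([], c :: rest)

theorem digitRun_snd_length (cs : List Char) : (digitRun cs).2.length ≤ cs.length := by
  induction cs with
  | nil => simp [digitRun]
  | cons c rest ih =>
    simp only [digitRun]
    split
    · simpa using Nat.le_succ_of_le ih
    · simp

-- B's outer while-loop over the remaining characters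
def altGo (cs : List Char) : List String :=
  match cs with
  | [] => []
  | c :: rest =>
    if c = '/' then
      match rest with
      | [] => ["/"]
      | c2 :: rest' => if c2 ≠ '/' then String.ofList [c, c2] :: altGo rest' else "/" :: altGo (c2 :: rest')
    else if PySem.Chars.isdigit c then
      String.ofList (c :: (digitRun rest).1) :: altGo (digitRun rest).2
    else
      String.ofList [c] :: altGo rest
termination_by cs.length
decreasing_by
  · simp
  · simp
  · simpa using Nat.lt_succ_of_le (digitRun_snd_length rest)
  · simp

def tokenize_back_groups_alt (s : Option String) : List String :=
  match s with
  | none => []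
  | some s => altGo s.toList

-- ===== PRECONDITION & SPEC =====
def Spec_tokenize_back_groups (s : Option String) (out : List String) : Prop := out = tokenize_back_groups_alt s
instance (s : Option String) (out : List String) : Decidable (Spec_tokenize_back_groups s out) := by unfold Spec_tokenize_back_groups; infer_instance

-- ===== CLAIM (what is proved, stated in full; the proofs are below) =====
def Claim_equal_tokenize_back_groups : Prop := ∀ (s : Option String), Dom_tokenize_back_groups s → Spec_tokenize_back_groups s (tokenize_back_groups s)

-- ===== LEMMAS AND PROOFS =====

-- what B does after a pending '/' (the inner match of altGo's slash case)
def slashCont (cs : List Char) : List String :=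
  match cs with
  | [] => ["/"]
  | c2 :: rest' => if c2 ≠ '/' then String.ofList ['/', c2] :: altGo rest' else "/" :: altGo (c2 :: rest')

theorem altGo_slash (cs : List Char) : altGo ('/' :: cs) = slashCont cs := by
  cases cs with
  | nil => rw [altGo.eq_def]; rfl
  | cons c2 rest' => rw [altGo.eq_def]; simp [slashCont]

theorem altGo_digit (c : Char) (rest : List Char) (hc : c ≠ '/')
    (hd : PySem.Chars.isdigit c = true) :
    altGo (c :: rest) = String.ofList (c :: (digitRun rest).1) :: altGo (digitRun rest).2 := by
  rw [altGo.eq_def]; simp [hc, hd]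

theorem altGo_other (c : Char) (rest : List Char) (hc : c ≠ '/')
    (hd : PySem.Chars.isdigit c = false) :
    altGo (c :: rest) = String.ofList [c] :: altGo rest := by
  rw [altGo.eq_def]; simp [hc, hd]

-- the three loop invariants, bundled: curr = '' / curr = '/' / curr nonempty digit run
theorem bundle : ∀ (n : Nat) (cs : List Char), cs.length < n →
    (∀ ret : List String, aFinish (cs.foldl aStep (ret, [])) = ret ++ altGo cs) ∧
    (∀ ret : List String, aFinish (cs.foldl aStep (ret, ['/'])) = ret ++ slashCont cs) ∧
    (∀ (ret : List String) (d : List Char), d ≠ [] → (∀ x ∈ d, PySem.Chars.isdigit x) →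
      aFinish (cs.foldl aStep (ret, d)) =
        ret ++ (String.ofList (d ++ (digitRun cs).1) :: altGo (digitRun cs).2)) := by
  intro n
  induction n with
  | zero => intro cs h; omega
  | succ n ih =>
    intro cs hlen
    cases cs with
    | nil =>
      refine ⟨?_, ?_, ?_⟩
      · intro ret; rw [altGo.eq_def]; simp [aFinish]
      · intro ret; simp [aFinish, slashCont]
      · intro ret d hd _
        rw [altGo.eq_def]
        simp [aFinish, digitRun, List.length_pos_iff, hd]
    | cons c rest =>
      have hr := ih rest (by simp at hlen; omega)
      refine ⟨?_, ?_, ?_⟩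
      · -- curr = ''
        intro ret
        by_cases hc : c = '/'
        · subst hc
          have hstep : aStep (ret, ([] : List Char)) '/' = (ret, ['/']) := by
            simp [aStep]
          rw [List.foldl_cons, hstep, hr.2.1 ret, altGo_slash]
        · by_cases hdig : PySem.Chars.isdigit c
          · have hstep : aStep (ret, ([] : List Char)) c = (ret, [c]) := by
              simp [aStep, hc, hdig]
            rw [List.foldl_cons, hstep,
              hr.2.2 ret [c] (by simp) (by simpa using hdig),
              altGo_digit c rest hc hdig]
            simp
          · have hstep : aStep (ret, ([] : List Char)) c = (ret ++ [String.ofList [c]], []) := by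
              simp [aStep, hc, hdig]
            rw [List.foldl_cons, hstep, hr.1 (ret ++ [String.ofList [c]]),
              altGo_other c rest hc (by simpa using hdig)]
            simp
      · -- curr = '/'
        intro ret
        by_cases hc : c = '/'
        · subst hc
          have hstep : aStep (ret, ['/']) '/' = (ret ++ [String.ofList ['/']], ['/']) := by
            simp [aStep]
          rw [List.foldl_cons, hstep, hr.2.1 (ret ++ [String.ofList ['/']])]
          have : slashCont ('/' :: rest) = "/" :: slashCont rest := by
            rw [slashCont]; simp [altGo_slash]
          rw [this]
          simp
        · have hstep : aStep (ret, ['/']) c = (ret ++ [String.ofList ['/', c]], []) := by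
            simp [aStep, hc]
          rw [List.foldl_cons, hstep, hr.1 (ret ++ [String.ofList ['/', c]])]
          rw [slashCont]
          simp [hc]
      · -- curr = nonempty digit run
        intro ret d hd hdig
        have hdne : d ≠ ['/'] := by
          intro h; subst h
          have := hdig '/' (by simp)
          simp [PySem.Chars.isdigit] at this
        have hdlen : d.length > 0 := by
          simpa [List.length_pos_iff] using hd
        by_cases hc : c = '/'
        · subst hc
          have hstep : aStep (ret, d) '/' = (ret ++ [String.ofList d], ['/']) := by
            simp [aStep, hdlen]
          rw [List.foldl_cons, hstep, hr.2.1 (ret ++ [String.ofList d])]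
          have hslash : PySem.Chars.isdigit '/' = false := by decide
          simp [digitRun, hslash, altGo_slash]
        · by_cases hdc : PySem.Chars.isdigit c
          · have hstep : aStep (ret, d) c = (ret, d ++ [c]) := by
              simp [aStep, hc, hdne, hdc]
            rw [List.foldl_cons, hstep,
              hr.2.2 ret (d ++ [c]) (by simp) (by
                intro x hx
                rcases List.mem_append.1 hx with h | h
                · exact hdig x h
                · simp at h; subst h; exact hdc)]
            simp [digitRun, hdc]
          · have hstep : aStep (ret, d) c = (ret ++ [String.ofList d, String.ofList [c]], []) := by
              simp [aStep, hc, hdne, hdc, hdlen]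
            rw [List.foldl_cons, hstep, hr.1 (ret ++ [String.ofList d, String.ofList [c]])]
            simp [digitRun, hdc, altGo_other c rest hc (by simpa using hdc)]

-- ===== VERDICT (by name: the statement is the Claim_ definition above) =====
theorem tokenize_back_groups_spec : Claim_equal_tokenize_back_groups := by
  intro s _
  unfold Spec_tokenize_back_groups tokenize_back_groups tokenize_back_groups_alt
  cases s with
  | none => rfl
  | some s =>
    simpa using (bundle (s.toList.length + 1) s.toList (by omega)).1 []
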